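-- pv_equiv track=rewrite | github.com/kitaev-chen/zen-mcp-server | clink/parsers/kimi.py | _extract_quoted_value
-- ===== SOURCE A (Python) =====
-- def _extract_quoted_value(line: str, prefix: str) -> str | None:
--     """Extract value after prefix= from a line, handling quoted strings.
--
--     Example: _extract_quoted_value('TextPart(text="hello world")', 'text=')
--     Returns: 'hello world'
--     """
--     start = line.find(prefix)
--     if start == -1:
--         return None
--
--     rest = line[start + len(prefix):]
--     if not rest or rest[0] not in "\"'":
--         return None
--
--     quote = rest[0]
--     chars = []
--     i = 1
--     while i < len(rest):
--         if rest[i] == quote and (i == 0 or rest[i - 1] != "\\"):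
--             break
--         chars.append(rest[i])
--         i += 1
--
--     return "".join(chars) if chars else None
-- ===== SOURCE B (Python) =====
-- def _extract_quoted_value(line: str, prefix: str) -> str | None:
--     """Extract value after prefix= from a line, handling quoted strings.
--
--     Instead of scanning character by character, jump between occurrences of
--     the quote with str.find and slice the value out in one step.
--     """
--     idx = line.find(prefix)
--     if idx < 0:
--         return None
--
--     rest = line[idx + len(prefix):]
--     if not rest.startswith(('"', "'")):
--         return None
--
--     quote = rest[0]
--     j = 1
--     while True:
--         k = rest.find(quote, j)
--         if k < 0:
--             end = len(rest)
--             break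
--         if rest[k - 1] != "\\":
--             end = k
--             break
--         j = k + 1
--
--     return rest[1:end] or None
-- ===== Notes on version B (the rewrite author's own statement) =====
-- stated objective: alternative
-- what changed: A scans the quoted region character by character, appending each char to a list and joining; B jumps directly between occurrences of the quote with str.find, checks the preceding char for a backslash, and slices the value out of the string in one step.
import Mathlib
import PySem

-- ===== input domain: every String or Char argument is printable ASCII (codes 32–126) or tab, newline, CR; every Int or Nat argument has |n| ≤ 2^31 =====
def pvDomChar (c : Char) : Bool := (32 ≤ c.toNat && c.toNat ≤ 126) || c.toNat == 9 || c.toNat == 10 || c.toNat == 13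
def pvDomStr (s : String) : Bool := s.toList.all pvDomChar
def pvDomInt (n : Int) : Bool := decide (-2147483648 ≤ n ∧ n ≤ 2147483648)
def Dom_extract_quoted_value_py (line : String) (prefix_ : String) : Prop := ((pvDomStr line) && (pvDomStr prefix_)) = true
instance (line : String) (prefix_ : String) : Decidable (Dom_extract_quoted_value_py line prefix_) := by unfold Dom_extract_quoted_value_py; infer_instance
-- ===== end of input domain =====

-- B replaces A's char-by-char scan/accumulate loop with find-jumps between quote
-- occurrences plus one slice (objective: alternative algorithm, same cost class).

-- ===== PORT A =====
-- the while loop of A: i from 1, collecting chars until an unescaped quote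
def pvALoop (rest : List Char) (q : Char) (chars : List Char) (i : Nat) : List Char :=
  if h : i < rest.length then
    if rest[i] = q ∧ (i = 0 ∨ rest[i - 1]? ≠ some '\\') then chars
    else pvALoop rest q (chars ++ [rest[i]]) (i + 1)
  else chars
termination_by rest.length - i

def extract_quoted_value_py (line : String) (prefix_ : String) : Option String :=
  let l := line.toList
  let p := prefix_.toList
  let start := PySem.Chars.find l p
  if start = -1 then none
  else
    let rest := PySem.Chars.slice l (some (start + (p.length : Int))) none
    match rest with
    | [] => none           -- "if not rest … return None"
    | c :: _ =>
      if c = '"' ∨ c = '\'' then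
        let chars := pvALoop rest c [] 1
        if chars = [] then none else some (String.ofList chars)
      else none            -- "rest[0] not in quotes"

-- ===== PORT B =====
-- facts about rest.find(q, j) needed for bLoop's termination
theorem pvFindFacts (rest : List Char) (q : Char) (j : Nat)
    (h : PySem.Chars.findFrom rest [q] (j : Int) none ≠ -1) :
    j ≤ (PySem.Chars.findFrom rest [q] (j : Int) none).toNat ∧
    (PySem.Chars.findFrom rest [q] (j : Int) none).toNat < rest.length ∧
    rest[(PySem.Chars.findFrom rest [q] (j : Int) none).toNat]? = some q ∧
    (∀ i, j ≤ i → i < (PySem.Chars.findFrom rest [q] (j : Int) none).toNat →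
      rest[i]? ≠ some q) := by
  by_cases hj : j ≤ rest.length
  · obtain ⟨h1, h2, h3⟩ := PySem.Chars.findFrom_natCast_spec rest [q] j hj h
    set K := (PySem.Chars.findFrom rest [q] (j : Int) none).toNat with hK
    have hjK : j ≤ K := by omega
    obtain ⟨t, ht⟩ := h2
    have hdrop : rest.drop K = q :: t := by simpa using ht.symm
    have hKlen : K < rest.length := by
      by_contra hcon
      have : rest.drop K = [] := List.drop_eq_nil_of_le (by omega)
      simp [this] at hdrop
    have hKq : rest[K]? = some q := by
      have : (rest.drop K)[0]? = some q := by simp [hdrop]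
      simpa [List.getElem?_drop] using this
    refine ⟨hjK, hKlen, hKq, ?_⟩
    intro i hi1 hi2 hiq
    have hilen : i < rest.length := by omega
    have : rest.drop i = q :: rest.drop (i + 1) := by
      rw [List.drop_eq_getElem_cons hilen]
      have : rest[i] = q := by
        have := List.getElem?_eq_getElem hilen
        rw [this] at hiq; exact Option.some_injective _ hiq
      rw [this]
    exact h3 i hi1 hi2 ⟨rest.drop (i + 1), by simp [this]⟩
  · exfalso
    apply h
    have hlt : (rest.length : Int) < (j : Int) := by exact_mod_cast Nat.lt_of_not_le (by omega)
    simp only [PySem.Chars.findFrom]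
    have h0 : ¬ ((j : Int) < 0) := by omega
    simp [h0]
    intro hle
    exact absurd hle hj

-- the while loop of B: jump between occurrences of q with find
def pvBLoop (rest : List Char) (q : Char) (j : Nat) : Nat :=
  let k := PySem.Chars.findFrom rest [q] (j : Int) none
  if hk : k = -1 then rest.length
  else if PySem.List.pyGet? rest (k - 1) ≠ some '\\' then k.toNat
  else pvBLoop rest q (k.toNat + 1)
termination_by rest.length - j
decreasing_by
  obtain ⟨h1, h2, -, -⟩ := pvFindFacts rest q j hk
  omega

def extract_quoted_value_py_alt (line : String) (prefix_ : String) : Option String :=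
  let l := line.toList
  let p := prefix_.toList
  let idx := PySem.Chars.find l p
  if idx < 0 then none
  else
    let rest := PySem.Chars.slice l (some (idx + (p.length : Int))) none
    if PySem.Chars.startswith rest ['"'] ∨ PySem.Chars.startswith rest ['\''] then
      match rest with
      | [] => none         -- unreachable: startswith forces rest nonempty
      | qc :: _ =>
        let e := pvBLoop rest qc 1
        let v := PySem.Chars.slice rest (some 1) (some (e : Int))
        if v = [] then none else some (String.ofList v)
    else none

-- ===== PRECONDITION & SPEC =====
def Spec_extract_quoted_value_py (line : String) (prefix_ : String) (out : Option String) : Prop := out = extract_quoted_value_py_alt line prefix_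
instance (line : String) (prefix_ : String) (out : Option String) : Decidable (Spec_extract_quoted_value_py line prefix_ out) := by unfold Spec_extract_quoted_value_py; infer_instance

-- ===== CLAIM (what is proved, stated in full; the proofs are below) =====
def Claim_equal_extract_quoted_value_py : Prop := ∀ (line : String) (prefix_ : String), Dom_extract_quoted_value_py line prefix_ → Spec_extract_quoted_value_py line prefix_ (extract_quoted_value_py line prefix_)

-- ===== LEMMAS AND PROOFS =====

-- the first index k ≥ i with rest[k] = q not preceded by a backslash, else rest.length
def pvStop (rest : List Char) (q : Char) (i : Nat) : Nat :=
  if h : i < rest.length then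
    if rest[i] = q ∧ (i = 0 ∨ rest[i - 1]? ≠ some '\\') then i
    else pvStop rest q (i + 1)
  else rest.length
termination_by rest.length - i

theorem pvStop_ge (rest : List Char) (q : Char) (i : Nat) (h : i ≤ rest.length) :
    i ≤ pvStop rest q i := by
  rw [pvStop]
  split
  · split
    · omega
    · have := pvStop_ge rest q (i + 1) (by omega)
      omega
  · omega
termination_by rest.length - i

theorem pvALoop_eq (rest : List Char) (q : Char) (i : Nat) (chars : List Char) :
    pvALoop rest q chars i = chars ++ (rest.drop i).take (pvStop rest q i - i) := by
  rw [pvALoop, pvStop]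
  split
  · rename_i h
    split
    · simp
    · rw [pvALoop_eq rest q (i + 1) (chars ++ [rest[i]])]
      have hge := pvStop_ge rest q (i + 1) (by omega)
      have hdrop : rest.drop i = rest[i] :: rest.drop (i + 1) := List.drop_eq_getElem_cons h
      rw [hdrop]
      have : pvStop rest q (i + 1) - i = (pvStop rest q (i + 1) - (i + 1)) + 1 := by omega
      rw [this, List.take_succ_cons, List.append_assoc, List.singleton_append]
  · rename_i h
    have : rest.drop i = [] := List.drop_eq_nil_of_le (by omega)
    simp [this]
termination_by rest.length - i

theorem pvStop_eq_len (rest : List Char) (q : Char) (i : Nat)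
    (h : ∀ m, i ≤ m → rest[m]? ≠ some q) : pvStop rest q i = rest.length := by
  rw [pvStop]
  split
  · rename_i hi
    have hne : ¬ (rest[i] = q ∧ (i = 0 ∨ rest[i - 1]? ≠ some '\\')) := by
      rintro ⟨h1, -⟩
      exact h i le_rfl (by rw [List.getElem?_eq_getElem hi, h1])
    rw [if_neg hne]
    exact pvStop_eq_len rest q (i + 1) (fun m hm => h m (by omega))
  · rfl
termination_by rest.length - i

theorem pvStop_skip (rest : List Char) (q : Char) (i K : Nat) (hik : i ≤ K)
    (hK : K ≤ rest.length) (h : ∀ m, i ≤ m → m < K → rest[m]? ≠ some q) :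
    pvStop rest q i = pvStop rest q K := by
  rcases Nat.eq_or_lt_of_le hik with heq | hlt
  · rw [heq]
  · have hi : i < rest.length := by omega
    rw [pvStop, dif_pos hi]
    have hne : ¬ (rest[i] = q ∧ (i = 0 ∨ rest[i - 1]? ≠ some '\\')) := by
      rintro ⟨h1, -⟩
      exact h i le_rfl hlt (by rw [List.getElem?_eq_getElem hi, h1])
    rw [if_neg hne]
    exact pvStop_skip rest q (i + 1) K hlt hK (fun m hm1 hm2 => h m (by omega) hm2)
termination_by K - i

theorem pvBLoop_eq (rest : List Char) (q : Char) (j : Nat) (hj1 : 1 ≤ j)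
    (hj2 : j ≤ rest.length) : pvBLoop rest q j = pvStop rest q j := by
  rw [pvBLoop]
  by_cases hk : PySem.Chars.findFrom rest [q] (j : Int) none = -1
  · simp only [hk, dif_pos]
    symm
    apply pvStop_eq_len
    intro m hm hmq
    rw [PySem.Chars.findFrom_natCast_eq_neg_one_iff rest [q] j hj2] at hk
    apply hk
    have hmlen : m < rest.length := by
      have := List.getElem?_eq_some_iff.mp hmq
      exact this.1
    have hpre : [q] <+: rest.drop m := by
      rw [List.drop_eq_getElem_cons hmlen]
      have : rest[m] = q := by
        rw [List.getElem?_eq_getElem hmlen] at hmq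
        exact Option.some_injective _ hmq
      rw [this]
      exact ⟨rest.drop (m + 1), rfl⟩
    have hsuf : rest.drop m <:+ rest.drop j := by
      have : (rest.drop j).drop (m - j) = rest.drop m := by
        rw [List.drop_drop]; congr 1; omega
      rw [← this]
      exact List.drop_suffix _ _
    exact hpre.isInfix.trans hsuf.isInfix
  · obtain ⟨h1, h2, h3, h4⟩ := pvFindFacts rest q j hk
    set k := PySem.Chars.findFrom rest [q] (j : Int) none with hkdef
    have hk0 : (0 : Int) ≤ k := by
      rcases Int.lt_or_le k 0 with hneg | hpos
      · exfalso; omega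
      · exact hpos
    set K := k.toNat with hKdef
    have hkK : k = (K : Int) := by omega
    have hK1 : 1 ≤ K := by omega
    have hprev : PySem.List.pyGet? rest (k - 1) = rest[K - 1]? := by
      rw [hkK]
      have : (K : Int) - 1 = ((K - 1 : Nat) : Int) := by omega
      rw [this, PySem.List.pyGet?_natCast]
    have hskip : pvStop rest q j = pvStop rest q K :=
      pvStop_skip rest q j K h1 (by omega) (fun m hm1 hm2 => h4 m hm1 hm2)
    have hKq : rest[K] = q := by
      rw [List.getElem?_eq_getElem h2] at h3
      exact Option.some_injective _ h3
    by_cases hb : PySem.List.pyGet? rest (k - 1) ≠ some '\\'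
    · rw [dif_neg hk, if_pos hb, hskip, pvStop, dif_pos h2, if_pos]
      exact ⟨hKq, Or.inr (by rw [← hprev]; exact hb)⟩
    · rw [dif_neg hk, if_neg hb]
      push Not at hb
      rw [hprev] at hb
      have hrec : pvBLoop rest q (K + 1) = pvStop rest q (K + 1) :=
        pvBLoop_eq rest q (K + 1) (by omega) (by omega)
      rw [hrec, hskip]
      conv_rhs => rw [pvStop, dif_pos h2, if_neg (by
        rintro ⟨-, hor⟩
        rcases hor with h0 | hno
        · omega
        · exact hno hb)]
termination_by rest.length - j
decreasing_by omega

-- ===== VERDICT (by name: the statement is the Claim_ definition above) =====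
theorem extract_quoted_value_py_spec : Claim_equal_extract_quoted_value_py := by
  intro line prefix_ _
  unfold Spec_extract_quoted_value_py
  simp only [extract_quoted_value_py, extract_quoted_value_py_alt]
  set l := line.toList
  set p := prefix_.toList
  set start := PySem.Chars.find l p with hstart
  have hge : -1 ≤ start := PySem.Chars.neg_one_le_find l p
  by_cases hs : start = -1
  · rw [if_pos hs, if_pos (by omega)]
  · rw [if_neg hs, if_neg (by omega)]
    generalize PySem.Chars.slice l (some (start + (p.length : Int))) none = rest
    cases rest with
    | nil => rw [if_neg (by decide)]
    | cons c tl =>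
      have hsw : (PySem.Chars.startswith (c :: tl) ['"'] ∨
          PySem.Chars.startswith (c :: tl) ['\'']) ↔ (c = '"' ∨ c = '\'') := by
        rw [PySem.Chars.startswith_iff, PySem.Chars.startswith_iff, List.cons_prefix_cons,
          List.cons_prefix_cons]
        constructor
        · rintro (h | h)
          · exact Or.inl h.1.symm
          · exact Or.inr h.1.symm
        · rintro (h | h)
          · exact Or.inl ⟨h.symm, by simp⟩
          · exact Or.inr ⟨h.symm, by simp⟩
      dsimp only
      by_cases hq : c = '"' ∨ c = '\''
      · rw [if_pos hq, if_pos (hsw.mpr hq)]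
        have he : pvBLoop (c :: tl) c 1 = pvStop (c :: tl) c 1 :=
          pvBLoop_eq _ _ 1 le_rfl (by simp)
        have hchars : pvALoop (c :: tl) c [] 1 =
            ((c :: tl).drop 1).take (pvStop (c :: tl) c 1 - 1) := by
          simpa using pvALoop_eq (c :: tl) c 1 []
        have hslice : PySem.Chars.slice (c :: tl) (some 1)
            (some ((pvBLoop (c :: tl) c 1 : Nat) : Int)) =
            ((c :: tl).drop 1).take (pvBLoop (c :: tl) c 1 - 1) := by
          rw [PySem.Chars.slice_eq_listSlice,
            PySem.List.slice_toNat _ (by norm_num) (Int.natCast_nonneg _)]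
          simp
        rw [hchars, hslice, he]
      · rw [if_neg hq, if_neg (by rw [hsw]; exact hq)]
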